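-- pv_equiv track=rewrite | github.com/paarthlakhani/Question_Answering_System | scoring program/question_handling.py | find_question_components
-- ===== SOURCE A (Python) =====
-- def find_question_components(question_file_content_lst):
--     """
--     Summary Line:
--     Given a  list containing question file lines as a list, this function groups each question ID,
--     question and difficulty into a dictionary and stores all such dictionaries in a list
--
--     Parameters:
--     question_file_content_lst(list): A list containg lines in the question file
--
--     Returns:
--     list: [{questionId:..., question:..., Difficulty:...},{questionId:..., question:..., Difficulty:...},{...}, ...]
--     """
--
--     question_pairs = []
--     question_dict = {}
--     for question_component in question_file_content_lst:
--         if question_component != "\n":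
--             question_component_parts = question_component.strip(
--                 "\n").split(":")
--             question_attr, question_attr_values = question_component_parts[0], question_component_parts[1]
--             if question_attr == "QuestionID":
--                 question_dict["QuestionID"] = question_attr_values
--             elif question_attr == "Question":
--                 question_dict["Question"] = question_attr_values
--             else:
--                 question_dict["Difficulty"] = question_attr_values
--
--         else:
--             if question_dict:
--                 question_pairs.append(question_dict)
--                 question_dict = {}
--     if question_dict:
--         question_pairs.append(question_dict)
--
--     return question_pairs
-- ===== SOURCE B (Python) =====
-- def find_question_components(question_file_content_lst):
--     # Two-pass: first collect the maximal runs of non-separator lines,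
--     # then build one dict per run.
--     groups = []
--     current = []
--     for line in question_file_content_lst:
--         if line == "\n":
--             if current:
--                 groups.append(current)
--                 current = []
--         else:
--             current.append(line)
--     if current:
--         groups.append(current)
--
--     result = []
--     for group in groups:
--         question_dict = {}
--         for line in group:
--             parts = line.strip("\n").split(":")
--             attr, value = parts[0], parts[1]
--             key = attr if attr in ("QuestionID", "Question") else "Difficulty"
--             question_dict[key] = value
--         result.append(question_dict)
--     return result
-- ===== Notes on version B (the rewrite author's own statement) =====
-- stated objective: alternative
-- what changed: Replaced A's single streaming loop with a mutable dict and flush-on-blank by a two-pass decomposition: first partition the lines into maximal runs of non-'\n' lines, then map each run to its dict.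
-- outside the precondition, e.g. on find_question_components(['NoColonLine\n']): A raises IndexError, B raises IndexError
import Mathlib
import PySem

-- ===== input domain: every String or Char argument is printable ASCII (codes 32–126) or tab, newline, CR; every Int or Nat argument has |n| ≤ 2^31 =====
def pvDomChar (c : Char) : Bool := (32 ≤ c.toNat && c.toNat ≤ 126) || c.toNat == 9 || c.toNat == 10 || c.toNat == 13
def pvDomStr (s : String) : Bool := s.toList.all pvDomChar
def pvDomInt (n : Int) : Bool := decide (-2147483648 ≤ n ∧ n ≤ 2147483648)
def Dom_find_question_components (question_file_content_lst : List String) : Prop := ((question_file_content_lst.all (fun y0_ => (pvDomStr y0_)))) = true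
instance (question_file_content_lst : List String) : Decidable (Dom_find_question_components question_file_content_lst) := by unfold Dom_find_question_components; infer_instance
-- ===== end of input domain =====

-- B replaces A's streaming accumulator with flush-on-blank by a two-pass decomposition
-- (group the lines into maximal non-separator runs, then build one dict per run); same cost, no speed claim.

-- ===== PORT A =====
-- A's loop state: (question_pairs as lists of items, question_dict).
def pvAStep (st : List (List (String × String)) × PySem.Dict String String)
    (question_component : String) :
    List (List (String × String)) × PySem.Dict String String :=
  if question_component ≠ "\n" then
    let question_component_parts :=
      (PySem.Str.split? (PySem.Str.stripChars question_component "\n") ":").getD []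
    let question_attr := (PySem.List.pyGet? question_component_parts 0).getD ""
    let question_attr_values := (PySem.List.pyGet? question_component_parts 1).getD ""
    if question_attr = "QuestionID" then
      (st.1, st.2.insert "QuestionID" question_attr_values)
    else if question_attr = "Question" then
      (st.1, st.2.insert "Question" question_attr_values)
    else
      (st.1, st.2.insert "Difficulty" question_attr_values)
  else
    if st.2.items ≠ [] then (st.1 ++ [st.2.items], PySem.Dict.empty) else st

def find_question_components (question_file_content_lst : List String) :
    List (List (String × String)) :=
  let st := question_file_content_lst.foldl pvAStep ([], PySem.Dict.empty)
  if st.2.items ≠ [] then st.1 ++ [st.2.items] else st.1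

-- ===== PORT B =====
-- first pass: collect maximal runs of lines that are not the separator "\n"
def pvGroupStep (st : List (List String) × List String) (line : String) :
    List (List String) × List String :=
  if line = "\n" then
    if st.2 ≠ [] then (st.1 ++ [st.2], []) else st
  else
    (st.1, st.2 ++ [line])

-- second pass, per group: one parsed line into the dict
def pvDStep (d : PySem.Dict String String) (line : String) : PySem.Dict String String :=
  let parts := (PySem.Str.split? (PySem.Str.stripChars line "\n") ":").getD []
  let attr := (PySem.List.pyGet? parts 0).getD ""
  let value := (PySem.List.pyGet? parts 1).getD ""
  let key := if attr = "QuestionID" ∨ attr = "Question" then attr else "Difficulty"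
  d.insert key value

def pvBuildDict (group : List String) : List (String × String) :=
  (group.foldl pvDStep PySem.Dict.empty).items

def find_question_components_alt (question_file_content_lst : List String) :
    List (List (String × String)) :=
  let st := question_file_content_lst.foldl pvGroupStep ([], [])
  let groups := if st.2 ≠ [] then st.1 ++ [st.2] else st.1
  groups.map pvBuildDict

-- ===== PRECONDITION & SPEC =====
-- Pre_ excludes exactly the inputs on which the Python A raises IndexError:
-- a line that is not the separator "\n" and contains no ':' (B raises there too).
def Pre_find_question_components (question_file_content_lst : List String) : Prop :=
  ∀ l ∈ question_file_content_lst, l = "\n" ∨ PySem.Str.isIn ":" l = true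
instance (question_file_content_lst : List String) : Decidable (Pre_find_question_components question_file_content_lst) := by unfold Pre_find_question_components; infer_instance

def pvWitness_find_question_components : List String :=
  ["QuestionID:1\n", "Question:What is it?\n", "Difficulty:easy\n", "\n", "QuestionID:2\n"]

def Spec_find_question_components (question_file_content_lst : List String) (out : List (List (String × String))) : Prop := out = find_question_components_alt question_file_content_lst
instance (question_file_content_lst : List String) (out : List (List (String × String))) : Decidable (Spec_find_question_components question_file_content_lst out) := by unfold Spec_find_question_components; infer_instance

-- ===== CLAIM (what is proved, stated in full; the proofs are below) =====
def Claim_equal_find_question_components : Prop := ∀ (question_file_content_lst : List String), Dom_find_question_components question_file_content_lst → Pre_find_question_components question_file_content_lst → Spec_find_question_components question_file_content_lst (find_question_components question_file_content_lst)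

-- ===== LEMMAS AND PROOFS =====

-- running B's per-group fold is the dict A carries for the current run
def pvDFold (cur : List String) : PySem.Dict String String :=
  cur.foldl pvDStep PySem.Dict.empty

theorem pvInsert_items_ne_nil (d : PySem.Dict String String) (k v : String) :
    (d.insert k v).items ≠ [] := by
  intro h
  have h1 : (d.insert k v).get? k = some v := PySem.Dict.get?_insert_self d k v
  have h2 : d.insert k v = PySem.Dict.mk [] := PySem.Dict.ext (by simpa using h)
  rw [h2] at h1
  have h3 : (none : Option String) = some v := h1
  simp at h3

theorem pvDStep_items_ne_nil (d : PySem.Dict String String) (line : String) :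
    (pvDStep d line).items ≠ [] :=
  pvInsert_items_ne_nil d _ _

theorem pvFoldl_items_nil_iff (cur : List String) (d : PySem.Dict String String) :
    (cur.foldl pvDStep d).items = [] ↔ cur = [] ∧ d.items = [] := by
  induction cur generalizing d with
  | nil => simp
  | cons x xs ih =>
    simp only [List.foldl_cons, ih]
    simp [pvDStep_items_ne_nil d x]

theorem pvDFold_items_nil_iff (cur : List String) :
    (pvDFold cur).items = [] ↔ cur = [] := by
  rw [pvDFold, pvFoldl_items_nil_iff]
  simp only [show (PySem.Dict.empty : PySem.Dict String String).items = [] from rfl, and_true]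

-- on a non-separator line, A's step is exactly B's per-group dict step
theorem pvAStep_nonsep (pairs : List (List (String × String)))
    (d : PySem.Dict String String) (line : String) (h : line ≠ "\n") :
    pvAStep (pairs, d) line = (pairs, pvDStep d line) := by
  simp only [pvAStep, pvDStep, if_pos h]
  set attr := (PySem.List.pyGet? ((PySem.Str.split? (PySem.Str.stripChars line "\n") ":").getD []) 0).getD "" with hattr
  by_cases h1 : attr = "QuestionID"
  · rw [if_pos h1, if_pos (Or.inl h1), h1]
  · by_cases h2 : attr = "Question"
    · rw [if_neg h1, if_pos h2, if_pos (Or.inr h2), h2]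
    · rw [if_neg h1, if_neg h2, if_neg (not_or.mpr ⟨h1, h2⟩)]

-- on the separator, A flushes a non-empty dict
theorem pvAStep_sep (pairs : List (List (String × String))) (d : PySem.Dict String String) :
    pvAStep (pairs, d) "\n"
      = if d.items ≠ [] then (pairs ++ [d.items], PySem.Dict.empty) else (pairs, d) := by
  rw [pvAStep, if_neg (by decide : ¬ ("\n" : String) ≠ "\n")]

theorem pvMap_buildDict_append (groups : List (List String)) (cur : List String) :
    (groups ++ [cur]).map pvBuildDict
      = groups.map pvBuildDict ++ [(pvDFold cur).items] := by
  simp only [List.map_append, List.map_cons, List.map_nil]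
  rfl

-- the loop invariant: A's stream from (built groups, dict of the current run)
-- equals B's grouping from (groups, current run) followed by the per-group build
theorem pvMain (lines : List String) (groups : List (List String)) (cur : List String) :
    (let st := lines.foldl pvAStep (groups.map pvBuildDict, pvDFold cur);
     if st.2.items ≠ [] then st.1 ++ [st.2.items] else st.1)
    = (let st := lines.foldl pvGroupStep (groups, cur);
       (if st.2 ≠ [] then st.1 ++ [st.2] else st.1).map pvBuildDict) := by
  induction lines generalizing groups cur with
  | nil =>
    simp only [List.foldl_nil]
    by_cases hc : cur = []
    · have h0 : (pvDFold cur).items = [] := (pvDFold_items_nil_iff cur).2 hc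
      rw [if_neg (by simpa using h0), if_neg (by simpa using hc)]
    · have h0 : (pvDFold cur).items ≠ [] := fun h => hc ((pvDFold_items_nil_iff cur).1 h)
      rw [if_pos h0, if_pos hc, pvMap_buildDict_append]
  | cons line rest ih =>
    by_cases hl : line = "\n"
    · subst hl
      by_cases hc : cur = []
      · subst hc
        have hA : pvAStep (groups.map pvBuildDict, pvDFold []) "\n"
            = (groups.map pvBuildDict, pvDFold []) := by
          rw [pvAStep_sep, if_neg (by simp [show (pvDFold []).items = [] from rfl])]
        have hG : pvGroupStep (groups, ([] : List String)) "\n" = (groups, []) := by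
          rw [pvGroupStep, if_pos rfl, if_neg (by simp)]
        simpa only [List.foldl_cons, hA, hG] using ih groups []
      · have h0 : (pvDFold cur).items ≠ [] := fun h => hc ((pvDFold_items_nil_iff cur).1 h)
        have hA : pvAStep (groups.map pvBuildDict, pvDFold cur) "\n"
            = ((groups ++ [cur]).map pvBuildDict, pvDFold []) := by
          rw [pvAStep_sep, if_pos h0, pvMap_buildDict_append]
          rfl
        have hG : pvGroupStep (groups, cur) "\n" = (groups ++ [cur], []) := by
          rw [pvGroupStep, if_pos rfl, if_pos hc]
        simpa only [List.foldl_cons, hA, hG] using ih (groups ++ [cur]) []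
    · have hA : pvAStep (groups.map pvBuildDict, pvDFold cur) line
          = (groups.map pvBuildDict, pvDFold (cur ++ [line])) := by
        rw [pvAStep_nonsep _ _ _ hl, pvDFold, pvDFold, List.foldl_append, List.foldl_cons, List.foldl_nil]
      have hG : pvGroupStep (groups, cur) line = (groups, cur ++ [line]) := by
        rw [pvGroupStep, if_neg hl]
      simpa only [List.foldl_cons, hA, hG] using ih groups (cur ++ [line])

-- ===== VERDICT (by name: the statement is the Claim_ definition above) =====
theorem find_question_components_spec : Claim_equal_find_question_components := by
  intro lst _hdom _hpre
  unfold Spec_find_question_components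
  have h := pvMain lst [] []
  simpa only [List.map_nil] using h
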